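-- pv_equiv track=rewrite | github.com/gjsk132/Coding_Life | 프로그래머스/2/131127. 할인 행사/할인 행사.py | solution
-- ===== SOURCE A (Python) =====
-- def solution(want, number, discount):
--     left_shopping_list = {x : y for x, y in zip(want, number)}
--
--     can_sign_up = 0
--
--     for day, dc in enumerate(discount):
--         if dc in want:
--             left_shopping_list[dc] -= 1
--
--         if day < 9:
--             continue
--         elif not day == 9:
--             finish_dc = discount[day-10]
--
--             if finish_dc in want:
--                 left_shopping_list[finish_dc] += 1
--
--         left_cnt = sum([max(cnt, 0) for cnt in left_shopping_list.values()])
--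
--         if left_cnt == 0:
--             can_sign_up += 1
--
--     return can_sign_up
-- ===== SOURCE B (Python) =====
-- def solution(want, number, discount):
--     need = dict(zip(want, number))
--     unsat = sum(1 for v in need.values() if v > 0)
--     ans = 0
--     for day, item in enumerate(discount):
--         if item in need:
--             need[item] -= 1
--             if need[item] == 0:
--                 unsat -= 1
--         if day >= 10:
--             out = discount[day - 10]
--             if out in need:
--                 need[out] += 1
--                 if need[out] == 1:
--                     unsat += 1
--         if day >= 9 and unsat == 0:
--             ans += 1
--     return ans
-- ===== Notes on version B (the rewrite author's own statement) =====
-- stated objective: faster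
-- what changed: Instead of re-summing max(cnt,0) over the whole wishlist dict on every day, B maintains an incremental deficit counter (number of wishlist items with remaining demand > 0) updated in O(1) as items enter/leave the 10-day sliding window.
import Mathlib
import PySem

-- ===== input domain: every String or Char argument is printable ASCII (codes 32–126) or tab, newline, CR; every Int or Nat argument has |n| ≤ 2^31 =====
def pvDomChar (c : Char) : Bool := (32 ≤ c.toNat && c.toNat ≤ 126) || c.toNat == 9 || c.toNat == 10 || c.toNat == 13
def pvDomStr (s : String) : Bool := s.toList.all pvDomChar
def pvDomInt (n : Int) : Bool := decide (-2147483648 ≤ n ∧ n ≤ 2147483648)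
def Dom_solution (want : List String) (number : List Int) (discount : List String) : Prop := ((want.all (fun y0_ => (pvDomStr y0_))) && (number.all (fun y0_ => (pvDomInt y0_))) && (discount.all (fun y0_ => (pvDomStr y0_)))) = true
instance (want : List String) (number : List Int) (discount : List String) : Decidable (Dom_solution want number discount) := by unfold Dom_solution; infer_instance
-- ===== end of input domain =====

-- B replaces A's per-day re-summation of the whole shopping dict by a sliding-window
-- deficit counter updated in O(1) per day (objective: faster, O(n+W) vs O(n*W)).

-- ===== PORT A =====
-- one loop step of A (day = p.1, dc = p.2); state = (left_shopping_list, can_sign_up)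
def stepA (want : List String) (discount : List String)
    (s : PySem.Dict String Int × Int) (p : Int × String) : PySem.Dict String Int × Int :=
  let d1 : PySem.Dict String Int :=
    if p.2 ∈ want then
      match s.1.get? p.2 with
      | some v => s.1.insert p.2 (v - 1)
      | none => s.1       -- Python raises KeyError here; Pre_solution excludes these inputs
    else s.1
  if p.1 < 9 then (d1, s.2)
  else
    let d2 : PySem.Dict String Int :=
      if p.1 = 9 then d1
      else
        match PySem.List.pyGet? discount (p.1 - 10) with
        | some fdc =>
            if fdc ∈ want then
              match d1.get? fdc with
              | some v => d1.insert fdc (v + 1)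
              | none => d1   -- KeyError; excluded by Pre_solution
            else d1
        | none => d1         -- unreachable: p.1 - 10 is always in range here
    let leftCnt : Int := (d2.values.map (fun cnt => max cnt 0)).sum
    (d2, if leftCnt = 0 then s.2 + 1 else s.2)

def solution (want : List String) (number : List Int) (discount : List String) : Int :=
  let left0 : PySem.Dict String Int :=
    (want.zip number).foldl (fun d q => d.insert q.1 q.2) PySem.Dict.empty
  ((PySem.List.enumerate discount).foldl (stepA want discount) (left0, 0)).2

-- ===== PORT B =====
-- one loop step of B; state = (need, unsat, ans)
def stepB (discount : List String)
    (s : PySem.Dict String Int × Int × Int) (p : Int × String) :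
    PySem.Dict String Int × Int × Int :=
  let s1 : PySem.Dict String Int × Int :=
    if s.1.contains p.2 then
      let need' := s.1.insert p.2 (s.1.getD p.2 0 - 1)
      (need', if need'.getD p.2 0 = 0 then s.2.1 - 1 else s.2.1)
    else (s.1, s.2.1)
  let s2 : PySem.Dict String Int × Int :=
    if 10 ≤ p.1 then
      match PySem.List.pyGet? discount (p.1 - 10) with
      | some out =>
          if s1.1.contains out then
            let need' := s1.1.insert out (s1.1.getD out 0 + 1)
            (need', if need'.getD out 0 = 1 then s1.2 + 1 else s1.2)
          else s1
      | none => s1           -- unreachable: p.1 - 10 is always in range here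
    else s1
  (s2.1, s2.2, if 9 ≤ p.1 ∧ s2.2 = 0 then s.2.2 + 1 else s.2.2)

def solution_alt (want : List String) (number : List Int) (discount : List String) : Int :=
  let need0 : PySem.Dict String Int :=
    (want.zip number).foldl (fun d q => d.insert q.1 q.2) PySem.Dict.empty
  let unsat0 : Int := need0.values.foldl (fun acc v => if 0 < v then acc + 1 else acc) 0
  ((PySem.List.enumerate discount).foldl (stepB discount) (need0, unsat0, 0)).2.2

-- ===== PRECONDITION & SPEC =====
-- Pre_ excludes exactly the inputs where A raises KeyError: a discount item that is in
-- want but not among the keys of dict(zip(want, number)) (i.e. not in want truncated to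
-- len(number)); B returns a normal count there instead of raising.
def Pre_solution (want : List String) (number : List Int) (discount : List String) : Prop :=
  ∀ x ∈ discount, x ∈ want → x ∈ want.take number.length

instance (want : List String) (number : List Int) (discount : List String) :
    Decidable (Pre_solution want number discount) := by unfold Pre_solution; infer_instance

def pvWitness_solution : List String × List Int × List String :=
  (["a", "b"], [1, 2], ["a", "b", "a"])

def Spec_solution (want : List String) (number : List Int) (discount : List String) (out : Int) : Prop := out = solution_alt want number discount
instance (want : List String) (number : List Int) (discount : List String) (out : Int) : Decidable (Spec_solution want number discount out) := by unfold Spec_solution; infer_instance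

-- ===== CLAIM (what is proved, stated in full; the proofs are below) =====
def Claim_equal_solution : Prop := ∀ (want : List String) (number : List Int) (discount : List String), Dom_solution want number discount → Pre_solution want number discount → Spec_solution want number discount (solution want number discount)
-- ===== LEMMAS AND PROOFS =====

-- number of still-unsatisfied wishlist items (values > 0) in a dict
def posCnt (d : PySem.Dict String Int) : Nat :=
  d.values.countP (fun v => decide (0 < v))

-- map fst of a zip is a take
theorem map_fst_zip_take (l : List String) (l' : List Int) :
    (l.zip l').map Prod.fst = l.take l'.length := by
  induction l generalizing l' with
  | nil => simp
  | cons a t ih =>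
    cases l' with
    | nil => simp
    | cons b t' => simp [ih]

-- A's left_cnt == 0 test is B's unsat == 0 test
theorem sum_max_eq_zero_iff (l : List Int) :
    ((l.map (fun v => max v 0)).sum = 0) ↔ (l.countP (fun v => decide (0 < v)) = 0) := by
  induction l with
  | nil => simp
  | cons a t ih =>
    have hnn : 0 ≤ (t.map (fun v => max v 0)).sum := by
      apply List.sum_nonneg; intro x hx
      simp only [List.mem_map] at hx
      obtain ⟨y, _, rfl⟩ := hx
      exact le_max_right y 0
    simp only [List.map_cons, List.sum_cons, List.countP_cons]
    by_cases hpos : 0 < a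
    · have h1 : max a 0 = a := max_eq_left (le_of_lt hpos)
      rw [h1]
      simp only [hpos, decide_true, if_true]
      omega
    · have h1 : max a 0 = 0 := max_eq_right (by omega)
      rw [h1]
      simp only [hpos, decide_false, Bool.false_eq_true, if_false]
      simpa using ih

-- effect of overwriting the single entry with key k (value v ↦ w) on a countP of values
theorem countP_snd_replace (p : Int → Bool) (k : String) (v w : Int) :
    ∀ (l : List (String × Int)), (l.map Prod.fst).Nodup → (k, v) ∈ l →
    ((l.map (fun q => if q.1 == k then (k, w) else q)).map Prod.snd).countP p
      + (if p v then 1 else 0)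
    = (l.map Prod.snd).countP p + (if p w then 1 else 0) := by
  intro l
  induction l with
  | nil => intro _ h; exact absurd h (List.not_mem_nil)
  | cons a t ih =>
    intro hnd hmem
    simp only [List.map_cons, List.nodup_cons] at hnd
    rcases List.mem_cons.mp hmem with heq | htl
    · -- head is the entry (k, v); the tail has no key k, so its map is the identity
      subst heq
      have htid : t.map (fun q => if q.1 == k then (k, w) else q) = t := by
        conv_rhs => rw [← List.map_id t]
        apply List.map_congr_left
        intro q hq
        have hq1 : ¬ ((q.1 == k) = true) := by
          simp only [beq_iff_eq]
          intro hk
          have hm : q.1 ∈ t.map Prod.fst := List.mem_map_of_mem (f := Prod.fst) hq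
          exact hnd.1 (hk ▸ hm)
        simp [hq1]
      simp only [List.map_cons, htid, List.countP_cons, beq_self_eq_true, if_true]
      omega
    · -- entry is in the tail; head key differs from k
      have hkmem : k ∈ t.map Prod.fst := List.mem_map_of_mem htl
      have hak : (a.1 == k) = false := by
        simp only [beq_eq_false_iff_ne, ne_eq]
        intro hk
        exact hnd.1 (hk ▸ hkmem)
      have := ih hnd.2 htl
      simp only [List.map_cons, hak, Bool.false_eq_true, if_false, List.countP_cons]
      omega

-- the same fact phrased on dicts: posCnt after insert of an existing key
theorem posCnt_insert (d : PySem.Dict String Int) (k : String) (v w : Int)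
    (hnd : d.keys.Nodup) (h : d.get? k = some v) :
    posCnt (d.insert k w) + (if 0 < v then 1 else 0)
      = posCnt d + (if 0 < w then 1 else 0) := by
  have hc : d.contains k = true := by
    rw [PySem.Dict.contains_eq_isSome_get?, h]; rfl
  have hmem : (k, v) ∈ d.items := PySem.Dict.mem_items_of_get?_eq_some d h
  have hrepl := countP_snd_replace (fun x => decide (0 < x)) k v w d.items hnd hmem
  unfold posCnt
  have hv : (d.insert k w).values
      = (d.items.map (fun q => if q.1 == k then (k, w) else q)).map Prod.snd := by
    show (d.insert k w).items.map Prod.snd = _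
    rw [PySem.Dict.items_insert_of_contains d w hc]
  have hv' : d.values = d.items.map Prod.snd := rfl
  rw [hv, hv']
  simpa using hrepl

-- keys of a dict built by the zip fold are exactly want.take number.length (as a set)
theorem mem_keys_need0 (want : List String) (number : List Int) (x : String) :
    x ∈ ((want.zip number).foldl (fun d q => d.insert q.1 q.2)
          (PySem.Dict.empty : PySem.Dict String Int)).keys
      ↔ x ∈ want.take number.length := by
  rw [PySem.Dict.keys_foldl_insert_key]
  simp only [PySem.Dict.keys_empty]
  have : PySem.Set.update ([] : List String) ((want.zip number).map Prod.fst)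
      = PySem.Set.ofList ((want.zip number).map Prod.fst) := rfl
  rw [this, map_fst_zip_take]
  exact PySem.Set.mem_ofList _ x

theorem nodup_keys_need0 (want : List String) (number : List Int) :
    ((want.zip number).foldl (fun d q => d.insert q.1 q.2)
      (PySem.Dict.empty : PySem.Dict String Int)).keys.Nodup :=
  PySem.Dict.nodup_keys_foldl_insert_key _ _ _ _ PySem.Dict.nodup_keys_empty

theorem loop_inv (want discount : List String) (keys0 : List String)
    (hmemEq : ∀ x ∈ discount, (x ∈ want ↔ x ∈ keys0))
    (l : List (Int × String)) (hl : ∀ q ∈ l, q.2 ∈ discount) :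
    ∀ (dA : PySem.Dict String Int) (cA : Int) (u cB : Int),
    dA.keys = keys0 → dA.keys.Nodup → u = (posCnt dA : Int) → cA = cB →
    (l.foldl (stepA want discount) (dA, cA)).2
      = (l.foldl (stepB discount) (dA, u, cB)).2.2 := by
  induction l with
  | nil => intro dA cA u cB _ _ _ hc; simpa using hc
  | cons p t ih =>
    intro dA cA u cB hkeys hnd hu hc
    simp only [List.foldl_cons]
    -- analyse one parallel step
    have hstep : ∃ d' u' cA' cB', stepA want discount (dA, cA) p = (d', cA')
        ∧ stepB discount (dA, u, cB) p = (d', u', cB')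
        ∧ d'.keys = keys0 ∧ d'.keys.Nodup ∧ u' = (posCnt d' : Int) ∧ cA' = cB' := by
      have hpd : p.2 ∈ discount := hl p (List.mem_cons_self)
      have hmem : p.2 ∈ want ↔ p.2 ∈ dA.keys := by rw [hkeys]; exact hmemEq p.2 hpd
      -- phase 1
      have phase1 : ∃ d1 u1,
          (if p.2 ∈ want then
            match dA.get? p.2 with
            | some v => dA.insert p.2 (v - 1)
            | none => dA
          else dA) = d1
          ∧ (if dA.contains p.2 then
              let need' := dA.insert p.2 (dA.getD p.2 0 - 1)
              (need', if need'.getD p.2 0 = 0 then u - 1 else u)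
            else (dA, u)) = (d1, u1)
          ∧ d1.keys = keys0 ∧ d1.keys.Nodup ∧ u1 = (posCnt d1 : Int) := by
        by_cases hw : p.2 ∈ want
        · have hcont : dA.contains p.2 = true := by
            rw [PySem.Dict.contains_iff_mem_keys]; exact hmem.mp hw
          obtain ⟨v, hv⟩ : ∃ v, dA.get? p.2 = some v := by
            have := PySem.Dict.contains_eq_isSome_get? (d := dA) (k := p.2)
            rw [hcont] at this
            exact Option.isSome_iff_exists.mp this.symm
          have hgd : dA.getD p.2 0 = v := PySem.Dict.getD_of_get?_eq_some _ 0 hv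
          refine ⟨dA.insert p.2 (v - 1), if v - 1 = 0 then u - 1 else u, ?_, ?_, ?_, ?_, ?_⟩
          · simp [hw, hv]
          · simp only [hcont, if_pos, hgd]
            rw [PySem.Dict.getD_insert_self]
          · rw [PySem.Dict.keys_insert_of_contains _ _ hcont, hkeys]
          · rw [PySem.Dict.keys_insert_of_contains _ _ hcont]; exact hnd
          · have hins := posCnt_insert dA p.2 v (v - 1) hnd hv
            rw [hu]
            split_ifs at hins ⊢ <;> omega
        · have hcont : dA.contains p.2 = false := by
            rw [← Bool.not_eq_true, PySem.Dict.contains_iff_mem_keys]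
            exact fun hk => hw (hmem.mpr hk)
          exact ⟨dA, u, by simp [hw], by simp [hcont], hkeys, hnd, hu⟩
      obtain ⟨d1, u1, hA1, hB1, hk1, hnd1, hu1⟩ := phase1
      -- phase 2
      have phase2 : ¬ p.1 < 9 → ∃ d2 u2,
          (if p.1 = 9 then d1
           else
            match PySem.List.pyGet? discount (p.1 - 10) with
            | some fdc =>
                if fdc ∈ want then
                  match d1.get? fdc with
                  | some v => d1.insert fdc (v + 1)
                  | none => d1
                else d1
            | none => d1) = d2
          ∧ (if 10 ≤ p.1 then
              match PySem.List.pyGet? discount (p.1 - 10) with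
              | some out =>
                  if d1.contains out then
                    let need' := d1.insert out (d1.getD out 0 + 1)
                    (need', if need'.getD out 0 = 1 then u1 + 1 else u1)
                  else (d1, u1)
              | none => (d1, u1)
            else (d1, u1)) = (d2, u2)
          ∧ d2.keys = keys0 ∧ d2.keys.Nodup ∧ u2 = (posCnt d2 : Int) := by
        intro hlt
        by_cases h9 : p.1 = 9
        · have : ¬ 10 ≤ p.1 := by omega
          exact ⟨d1, u1, by simp [h9], by simp [this], hk1, hnd1, hu1⟩
        · have h10 : 10 ≤ p.1 := by omega
          cases hg : PySem.List.pyGet? discount (p.1 - 10) with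
          | none => exact ⟨d1, u1, by simp [h9], by simp [h10], hk1, hnd1, hu1⟩
          | some fdc =>
            have hfd : fdc ∈ discount := PySem.List.mem_of_pyGet?_eq_some _ hg
            have hmem2 : fdc ∈ want ↔ fdc ∈ d1.keys := by
              rw [hk1]; exact hmemEq fdc hfd
            by_cases hw : fdc ∈ want
            · have hcont : d1.contains fdc = true := by
                rw [PySem.Dict.contains_iff_mem_keys]; exact hmem2.mp hw
              obtain ⟨v, hv⟩ : ∃ v, d1.get? fdc = some v := by
                have := PySem.Dict.contains_eq_isSome_get? (d := d1) (k := fdc)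
                rw [hcont] at this
                exact Option.isSome_iff_exists.mp this.symm
              have hgd : d1.getD fdc 0 = v := PySem.Dict.getD_of_get?_eq_some _ 0 hv
              refine ⟨d1.insert fdc (v + 1), if v + 1 = 1 then u1 + 1 else u1,
                ?_, ?_, ?_, ?_, ?_⟩
              · simp [h9, hw, hv]
              · simp only [h10, if_pos, hcont, hgd]
                rw [PySem.Dict.getD_insert_self]
              · rw [PySem.Dict.keys_insert_of_contains _ _ hcont, hk1]
              · rw [PySem.Dict.keys_insert_of_contains _ _ hcont]; exact hnd1
              · have hins := posCnt_insert d1 fdc v (v + 1) hnd1 hv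
                rw [hu1]
                split_ifs at hins ⊢ <;> omega
            · have hcont : d1.contains fdc = false := by
                rw [← Bool.not_eq_true, PySem.Dict.contains_iff_mem_keys]
                exact fun hk => hw (hmem2.mpr hk)
              exact ⟨d1, u1, by simp [h9, hw], by simp [h10, hcont],
                hk1, hnd1, hu1⟩
      -- assemble
      by_cases hlt : p.1 < 9
      · have hnot9 : ¬ 9 ≤ p.1 := by omega
        have hnot10 : ¬ 10 ≤ p.1 := by omega
        refine ⟨d1, u1, cA, cB, ?_, ?_, hk1, hnd1, hu1, hc⟩
        · simp only [stepA, hA1, if_pos hlt]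
        · simp only [stepB]
          rw [hB1]
          simp [hnot9, hnot10]
      · obtain ⟨d2, u2, hA2, hB2, hk2, hnd2, hu2⟩ := phase2 hlt
        have h9le : 9 ≤ p.1 := by omega
        have hcntEq : ((d2.values.map (fun cnt => max cnt 0)).sum = 0) ↔ (u2 = 0) := by
          rw [hu2, sum_max_eq_zero_iff]
          unfold posCnt
          omega
        refine ⟨d2, u2, if (d2.values.map (fun cnt => max cnt 0)).sum = 0 then cA + 1 else cA,
          if 9 ≤ p.1 ∧ u2 = 0 then cB + 1 else cB, ?_, ?_, hk2, hnd2, hu2, ?_⟩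
        · simp only [stepA, hA1, if_neg hlt, hA2]
        · simp only [stepB]
          rw [hB1]
          simp only []
          rw [hB2]
        · subst hc
          by_cases hz : (d2.values.map (fun cnt => max cnt 0)).sum = 0
          · have := hcntEq.mp hz
            simp [hz, h9le, this]
          · have : ¬ u2 = 0 := fun h => hz (hcntEq.mpr h)
            simp [hz, this]
    obtain ⟨d', u', cA', cB', hA, hB, hk', hnd', hu', hc'⟩ := hstep
    rw [hA, hB]
    exact ih (fun q hq => hl q (List.mem_cons_of_mem _ hq)) d' cA' u' cB' hk' hnd' hu' hc'

-- ===== VERDICT (by name: the statement is the Claim_ definition above) =====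
theorem solution_spec : Claim_equal_solution := by
  intro want number discount _ hpre
  unfold Spec_solution solution solution_alt
  have hnd : ((want.zip number).foldl (fun d q => d.insert q.1 q.2)
      (PySem.Dict.empty : PySem.Dict String Int)).keys.Nodup := nodup_keys_need0 want number
  have hmemEq : ∀ x ∈ discount, (x ∈ want ↔ x ∈ ((want.zip number).foldl
      (fun d q => d.insert q.1 q.2) (PySem.Dict.empty : PySem.Dict String Int)).keys) := by
    intro x hx
    rw [mem_keys_need0]
    exact ⟨fun h => hpre x hx h, fun h => List.mem_of_mem_take h⟩
  have henum : ∀ q ∈ PySem.List.enumerate discount, q.2 ∈ discount := by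
    intro q hq
    rcases (PySem.List.mem_enumerate_iff _ _ _).mp hq with ⟨k, hk, rfl⟩
    exact List.getElem_mem hk
  have hu0 : ((want.zip number).foldl (fun d q => d.insert q.1 q.2)
        (PySem.Dict.empty : PySem.Dict String Int)).values.foldl
        (fun acc v => if 0 < v then acc + 1 else acc) 0
      = (posCnt ((want.zip number).foldl (fun d q => d.insert q.1 q.2)
          (PySem.Dict.empty : PySem.Dict String Int)) : Int) := by
    rw [PySem.List.foldl_ite_add_one]
    unfold posCnt
    simp
  show ((PySem.List.enumerate discount).foldl (stepA want discount)
        ((want.zip number).foldl (fun d q => d.insert q.1 q.2) PySem.Dict.empty, 0)).2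
    = ((PySem.List.enumerate discount).foldl (stepB discount)
        ((want.zip number).foldl (fun d q => d.insert q.1 q.2) PySem.Dict.empty,
         ((want.zip number).foldl (fun d q => d.insert q.1 q.2)
           (PySem.Dict.empty : PySem.Dict String Int)).values.foldl
           (fun acc v => if 0 < v then acc + 1 else acc) 0, 0)).2.2
  rw [hu0]
  exact loop_inv want discount _ hmemEq (PySem.List.enumerate discount) henum
    _ 0 _ 0 rfl hnd rfl rfl
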